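-- pv_equiv track=rewrite | github.com/Milla-Duke/visuals-scheduler | visuals_today.py | slack_mention
-- ===== SOURCE A (Python) =====
-- NAME_TO_SLACK_ID = {
--     "Corey Fleming":       "U05MSEE6CLE",
--     "Cameron Pitney":      "UJCKXB7TN",
--     "Claudia Tarrant":     "U6WLV9NHH",
--     "Finn Little":         "U04Q8RUES87",
--     "Anna Heath":          "U09H5K1Q0Q7",
--     "Annaleise Shortland": "UME9TL2HW",
--     "Jason Dorday":        "U05VDUBTJ9W",
--     "Michael Craig":       "U480M042V",
--     "Kane Dickie":         "U03DA4YAFSN",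
--     "Dean Purcell":        "U4B81DLTW",
--     "Alyse Wright":        "U057GUTGG3W",
--     "Sylvie Whinray":      "U0A3XK4466S",
--     "Tom Augustine":       "U954JL83S",
--     "Mark Mitchell":       "U4AJQH95Y",
--     "Ella Wilks":          "U4BV744Q5",
--     "Hayden Woodward":     "U03R4TRKTRR",
--     "Michael Morrah":      "U07B4DXQ95H",
--     "Sarah Bristow":       "U07BTB113U0",
--     "Mike Scott":          "U4PLY5LMV",
--     "Simon Plumb":         "U47T7L7S4",
--     "Darryn Fouhy":        "U08DYNFE4BT",
--     "Garth Bray":          "U07C7N4EEKS",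
--     "Katie Oliver":        "U06Q0JLGKTN",
-- }
--
-- NAME_TO_SLACK = {
--     "Corey Fleming":       "Corey Fleming",
--     "Cameron Pitney":      "Cameron Pitney",
--     "Claudia Tarrant":     "Claudie",
--     "Finn Little":         "Finn Little",
--     "Anna Heath":          "Anna Heath",
--     "Annaleise Shortland": "Annaleise Shortland",
--     "Jason Dorday":        "Jason Dorday",
--     "Michael Craig":       "michael.craig",
--     "Kane Dickie":         "Kane Dickie",
--     "Dean Purcell":        "dean.purcell",
--     "Alyse Wright":        "Alyse Wright",
--     "Sylvie Whinray":      "Sylvie Whinray",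
--     "Tom Augustine":       "Tom Augustine",
--     "Mark Mitchell":       "mark.mitchell",
--     "Ella Wilks":          "Ella Wilks",
--     "Hayden Woodward":     "Hayden",
--     "Michael Morrah":      "Michael Morrah",
--     "Sarah Bristow":       "Sarah Bristow",
--     "Mike Scott":          "Mike Scott",
--     "Simon Plumb":         "simon.plumb",
--     "Dallas Smith":        "dallas.smith",
--     "Darryn Fouhy":        "Darryn Fouhy",
--     "Garth Bray":          "Garth Bray",
--     "Katie Oliver":        "Katie Oliver",
-- }
--
-- def slack_mention(name):
--     """Convert a name to a Slack @mention using User ID where possible."""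
--     name = name.strip()
--     if name in NAME_TO_SLACK_ID:
--         return f"<@{NAME_TO_SLACK_ID[name]}>"
--     name_lower = name.lower()
--     for key, uid in NAME_TO_SLACK_ID.items():
--         if key.lower() == name_lower:
--             return f"<@{uid}>"
--     for key, uid in NAME_TO_SLACK_ID.items():
--         if name_lower in key.lower().split():
--             return f"<@{uid}>"
--     return f"@{NAME_TO_SLACK.get(name, name)}"
-- ===== SOURCE B (Python) =====
-- # B keeps the whole directory in one (name, slack_id, display) table and builds a
-- # single merged mention index at import (exact names, then lowered names, then
-- # name tokens; first occurrence wins), so a call is at most two dict lookups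
-- # instead of two per-call linear scans.
--
-- _DIRECTORY = [
--     ("Corey Fleming", "U05MSEE6CLE", "Corey Fleming"),
--     ("Cameron Pitney", "UJCKXB7TN", "Cameron Pitney"),
--     ("Claudia Tarrant", "U6WLV9NHH", "Claudie"),
--     ("Finn Little", "U04Q8RUES87", "Finn Little"),
--     ("Anna Heath", "U09H5K1Q0Q7", "Anna Heath"),
--     ("Annaleise Shortland", "UME9TL2HW", "Annaleise Shortland"),
--     ("Jason Dorday", "U05VDUBTJ9W", "Jason Dorday"),
--     ("Michael Craig", "U480M042V", "michael.craig"),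
--     ("Kane Dickie", "U03DA4YAFSN", "Kane Dickie"),
--     ("Dean Purcell", "U4B81DLTW", "dean.purcell"),
--     ("Alyse Wright", "U057GUTGG3W", "Alyse Wright"),
--     ("Sylvie Whinray", "U0A3XK4466S", "Sylvie Whinray"),
--     ("Tom Augustine", "U954JL83S", "Tom Augustine"),
--     ("Mark Mitchell", "U4AJQH95Y", "mark.mitchell"),
--     ("Ella Wilks", "U4BV744Q5", "Ella Wilks"),
--     ("Hayden Woodward", "U03R4TRKTRR", "Hayden"),
--     ("Michael Morrah", "U07B4DXQ95H", "Michael Morrah"),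
--     ("Sarah Bristow", "U07BTB113U0", "Sarah Bristow"),
--     ("Mike Scott", "U4PLY5LMV", "Mike Scott"),
--     ("Simon Plumb", "U47T7L7S4", "simon.plumb"),
--     ("Dallas Smith", "", "dallas.smith"),
--     ("Darryn Fouhy", "U08DYNFE4BT", "Darryn Fouhy"),
--     ("Garth Bray", "U07C7N4EEKS", "Garth Bray"),
--     ("Katie Oliver", "U06Q0JLGKTN", "Katie Oliver"),
-- ]
--
-- _DISPLAY = {}
-- _MENTION_INDEX = {}
-- for _n, _u, _d in _DIRECTORY:
--     _DISPLAY[_n] = _d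
--     if _u:
--         _MENTION_INDEX.setdefault(_n, _u)
-- for _n, _u, _d in _DIRECTORY:
--     if _u:
--         _MENTION_INDEX.setdefault(_n.lower(), _u)
-- for _n, _u, _d in _DIRECTORY:
--     if _u:
--         for _t in _n.lower().split():
--             _MENTION_INDEX.setdefault(_t, _u)
--
--
-- def _lookup_uid(name):
--     uid = _MENTION_INDEX.get(name)
--     if uid is None:
--         uid = _MENTION_INDEX.get(name.lower())
--     return uid
--
--
-- def slack_mention(name):
--     """Convert a name to a Slack @mention using User ID where possible."""
--     name = name.strip()
--     uid = _lookup_uid(name)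
--     if uid is not None:
--         return f"<@{uid}>"
--     return f"@{_DISPLAY.get(name, name)}"
-- ===== Notes on version B (the rewrite author's own statement) =====
-- stated objective: alternative
-- what changed: B keeps the whole directory as one plain-text table parsed once at import and merges A's three matching tiers (exact name, lowered name, name tokens) into a single setdefault-built index dict, so a call does at most two dict lookups instead of A's per-call linear scans.
import Mathlib
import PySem

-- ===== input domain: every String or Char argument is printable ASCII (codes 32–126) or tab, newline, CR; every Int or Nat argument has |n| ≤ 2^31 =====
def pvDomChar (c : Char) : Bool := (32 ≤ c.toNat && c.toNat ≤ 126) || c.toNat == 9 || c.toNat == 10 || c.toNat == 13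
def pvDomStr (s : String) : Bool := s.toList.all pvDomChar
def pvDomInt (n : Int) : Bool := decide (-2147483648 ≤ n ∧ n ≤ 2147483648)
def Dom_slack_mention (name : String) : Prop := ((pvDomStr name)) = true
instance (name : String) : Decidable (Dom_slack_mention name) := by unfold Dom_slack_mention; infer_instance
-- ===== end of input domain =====

-- B replaces A's per-call linear scans with one merged mention index (exact names,
-- lowered names, then name tokens; first occurrence wins) built once from a single
-- (name, id, display) directory table, so a call is at most two dict lookups.

-- ===== PORT A =====
def tableID : PySem.Dict String String := PySem.Dict.ofList [
  ("Corey Fleming", "U05MSEE6CLE"),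
  ("Cameron Pitney", "UJCKXB7TN"),
  ("Claudia Tarrant", "U6WLV9NHH"),
  ("Finn Little", "U04Q8RUES87"),
  ("Anna Heath", "U09H5K1Q0Q7"),
  ("Annaleise Shortland", "UME9TL2HW"),
  ("Jason Dorday", "U05VDUBTJ9W"),
  ("Michael Craig", "U480M042V"),
  ("Kane Dickie", "U03DA4YAFSN"),
  ("Dean Purcell", "U4B81DLTW"),
  ("Alyse Wright", "U057GUTGG3W"),
  ("Sylvie Whinray", "U0A3XK4466S"),
  ("Tom Augustine", "U954JL83S"),
  ("Mark Mitchell", "U4AJQH95Y"),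
  ("Ella Wilks", "U4BV744Q5"),
  ("Hayden Woodward", "U03R4TRKTRR"),
  ("Michael Morrah", "U07B4DXQ95H"),
  ("Sarah Bristow", "U07BTB113U0"),
  ("Mike Scott", "U4PLY5LMV"),
  ("Simon Plumb", "U47T7L7S4"),
  ("Darryn Fouhy", "U08DYNFE4BT"),
  ("Garth Bray", "U07C7N4EEKS"),
  ("Katie Oliver", "U06Q0JLGKTN")]

def tableName : PySem.Dict String String := PySem.Dict.ofList [
  ("Corey Fleming", "Corey Fleming"),
  ("Cameron Pitney", "Cameron Pitney"),
  ("Claudia Tarrant", "Claudie"),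
  ("Finn Little", "Finn Little"),
  ("Anna Heath", "Anna Heath"),
  ("Annaleise Shortland", "Annaleise Shortland"),
  ("Jason Dorday", "Jason Dorday"),
  ("Michael Craig", "michael.craig"),
  ("Kane Dickie", "Kane Dickie"),
  ("Dean Purcell", "dean.purcell"),
  ("Alyse Wright", "Alyse Wright"),
  ("Sylvie Whinray", "Sylvie Whinray"),
  ("Tom Augustine", "Tom Augustine"),
  ("Mark Mitchell", "mark.mitchell"),
  ("Ella Wilks", "Ella Wilks"),
  ("Hayden Woodward", "Hayden"),
  ("Michael Morrah", "Michael Morrah"),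
  ("Sarah Bristow", "Sarah Bristow"),
  ("Mike Scott", "Mike Scott"),
  ("Simon Plumb", "simon.plumb"),
  ("Dallas Smith", "dallas.smith"),
  ("Darryn Fouhy", "Darryn Fouhy"),
  ("Garth Bray", "Garth Bray"),
  ("Katie Oliver", "Katie Oliver")]

-- A's first loop: first key whose .lower() equals name_lower
def scanEq (nl : String) : List (String × String) → Option String
  | [] => none
  | (k, uid) :: rest => if PySem.Str.lower k == nl then some uid else scanEq nl rest

-- A's second loop: first key whose lowered token list contains name_lower
def scanTok (nl : String) : List (String × String) → Option String
  | [] => none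
  | (k, uid) :: rest =>
      if nl ∈ PySem.Str.split₀ (PySem.Str.lower k) then some uid else scanTok nl rest

def slack_mention (name : String) : String :=
  match tableID.get? (PySem.Str.strip name) with
  | some uid => "<@" ++ uid ++ ">"
  | none =>
    match scanEq (PySem.Str.lower (PySem.Str.strip name)) tableID.items with
    | some uid => "<@" ++ uid ++ ">"
    | none =>
      match scanTok (PySem.Str.lower (PySem.Str.strip name)) tableID.items with
      | some uid => "<@" ++ uid ++ ">"
      | none => "@" ++ tableName.getD (PySem.Str.strip name) (PySem.Str.strip name)

-- ===== PORT B =====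
-- the single (name, slack id or "", display name) directory table of Source B
def directoryRows : List (String × String × String) := [
  ("Corey Fleming", "U05MSEE6CLE", "Corey Fleming"),
  ("Cameron Pitney", "UJCKXB7TN", "Cameron Pitney"),
  ("Claudia Tarrant", "U6WLV9NHH", "Claudie"),
  ("Finn Little", "U04Q8RUES87", "Finn Little"),
  ("Anna Heath", "U09H5K1Q0Q7", "Anna Heath"),
  ("Annaleise Shortland", "UME9TL2HW", "Annaleise Shortland"),
  ("Jason Dorday", "U05VDUBTJ9W", "Jason Dorday"),
  ("Michael Craig", "U480M042V", "michael.craig"),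
  ("Kane Dickie", "U03DA4YAFSN", "Kane Dickie"),
  ("Dean Purcell", "U4B81DLTW", "dean.purcell"),
  ("Alyse Wright", "U057GUTGG3W", "Alyse Wright"),
  ("Sylvie Whinray", "U0A3XK4466S", "Sylvie Whinray"),
  ("Tom Augustine", "U954JL83S", "Tom Augustine"),
  ("Mark Mitchell", "U4AJQH95Y", "mark.mitchell"),
  ("Ella Wilks", "U4BV744Q5", "Ella Wilks"),
  ("Hayden Woodward", "U03R4TRKTRR", "Hayden"),
  ("Michael Morrah", "U07B4DXQ95H", "Michael Morrah"),
  ("Sarah Bristow", "U07BTB113U0", "Sarah Bristow"),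
  ("Mike Scott", "U4PLY5LMV", "Mike Scott"),
  ("Simon Plumb", "U47T7L7S4", "simon.plumb"),
  ("Dallas Smith", "", "dallas.smith"),
  ("Darryn Fouhy", "U08DYNFE4BT", "Darryn Fouhy"),
  ("Garth Bray", "U07C7N4EEKS", "Garth Bray"),
  ("Katie Oliver", "U06Q0JLGKTN", "Katie Oliver")]

-- first loop of Source B: display dict and the exact-name tier of the index
def tier0 : PySem.Dict String String × PySem.Dict String String :=
  directoryRows.foldl
    (fun acc r =>
      (acc.1.insert r.1 r.2.2, if r.2.1 ≠ "" then acc.2.setdefault r.1 r.2.1 else acc.2))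
    (PySem.Dict.empty, PySem.Dict.empty)

def displayTable : PySem.Dict String String := tier0.1

-- second and third loops of Source B: lowered-name tier, then token tier
def mentionIndex : PySem.Dict String String :=
  let d2 := directoryRows.foldl
    (fun d r => if r.2.1 ≠ "" then d.setdefault (PySem.Str.lower r.1) r.2.1 else d) tier0.2
  directoryRows.foldl
    (fun d r =>
      if r.2.1 ≠ "" then
        (PySem.Str.split₀ (PySem.Str.lower r.1)).foldl (fun d t => d.setdefault t r.2.1) d
      else d) d2

-- Source B's _lookup_uid: first merged-index hit on the name, then on its lowercase
def lookup_uid (name : String) : Option String :=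
  match mentionIndex.get? name with
  | some u => some u
  | none => mentionIndex.get? (PySem.Str.lower name)

def slack_mention_alt (name : String) : String :=
  match lookup_uid (PySem.Str.strip name) with
  | some u => "<@" ++ u ++ ">"
  | none => "@" ++ displayTable.getD (PySem.Str.strip name) (PySem.Str.strip name)

-- ===== PRECONDITION & SPEC =====
def Spec_slack_mention (name : String) (out : String) : Prop := out = slack_mention_alt name
instance (name : String) (out : String) : Decidable (Spec_slack_mention name out) := by unfold Spec_slack_mention; infer_instance

-- ===== CLAIM (what is proved, stated in full; the proofs are below) =====
def Claim_equal_slack_mention : Prop := ∀ (name : String), Dom_slack_mention name → Spec_slack_mention name (slack_mention name)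

-- ===== LEMMAS AND PROOFS =====
-- ---- generic facts about lowercasing ----
theorem lowerChar_idem (c : Char) :
    PySem.Chars.lowerChar (PySem.Chars.lowerChar c) = PySem.Chars.lowerChar c := by
  unfold PySem.Chars.lowerChar PySem.Chars.isupper
  by_cases hA : 'A' ≤ c
  · by_cases hZ : c ≤ 'Z'
    · have h1 : 65 ≤ c.toNat := by rw [Char.le_def] at hA; exact UInt32.le_iff_toNat_le.mp hA
      have h2 : c.toNat ≤ 90 := by rw [Char.le_def] at hZ; exact UInt32.le_iff_toNat_le.mp hZ
      have hv : (Char.ofNat (c.toNat + 32)).toNat = c.toNat + 32 := by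
        rw [Char.toNat_ofNat, if_pos]
        exact Or.inl (by omega)
      simp only [hA, hZ, decide_true, Bool.and_self, if_true]
      rw [if_neg]
      intro hcon
      have hle : Char.ofNat (c.toNat + 32) ≤ 'Z' := of_decide_eq_true (Bool.and_elim_right hcon)
      rw [Char.le_def] at hle
      have h3 := UInt32.le_iff_toNat_le.mp hle
      have hz : ('Z' : Char).toNat = 90 := by decide
      change (Char.ofNat (c.toNat + 32)).toNat ≤ ('Z' : Char).toNat at h3
      omega
    · simp [hZ]
  · simp [hA]

theorem lower_idem (s : String) :
    PySem.Str.lower (PySem.Str.lower s) = PySem.Str.lower s := by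
  have h : (PySem.Str.lower (PySem.Str.lower s)).toList = (PySem.Str.lower s).toList := by
    simp only [PySem.Str.toList_lower]
    show (PySem.Chars.lower s.toList).map PySem.Chars.lowerChar = PySem.Chars.lower s.toList
    show (s.toList.map PySem.Chars.lowerChar).map PySem.Chars.lowerChar = s.toList.map PySem.Chars.lowerChar
    rw [List.map_map]
    exact List.map_congr_left fun c _ => lowerChar_idem c
  exact String.toList_inj.mp h

theorem split₀_go_chars {p : Char → Prop} (cs : List Char) (cur : List Char) (acc : List (List Char))
    (t : List Char) (ht : t ∈ PySem.Chars.split₀.go cs cur acc)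
    (hacc : ∀ l ∈ acc, ∀ c ∈ l, p c) (hcur : ∀ c ∈ cur, p c) (hcs : ∀ c ∈ cs, p c) :
    ∀ c ∈ t, p c := by
  induction cs generalizing cur acc with
  | nil =>
    simp only [PySem.Chars.split₀.go] at ht
    by_cases he : cur.isEmpty = true
    · rw [if_pos he] at ht
      rw [List.mem_reverse] at ht
      exact hacc t ht
    · rw [if_neg he] at ht
      rw [List.mem_reverse] at ht
      rcases List.mem_cons.mp ht with h | h
      · subst h; intro c hc; exact hcur c (List.mem_reverse.mp hc)
      · exact hacc t h
  | cons ch rest ih =>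
    simp only [PySem.Chars.split₀.go] at ht
    by_cases hs : PySem.Chars.isspace ch = true
    · rw [if_pos hs] at ht
      by_cases he : cur.isEmpty = true
      · rw [if_pos he] at ht
        exact ih _ _ ht hacc (by intro c hc; exact absurd hc (List.not_mem_nil)) (fun c hc => hcs c (List.mem_cons_of_mem _ hc))
      · rw [if_neg he] at ht
        refine ih _ _ ht ?_ (by intro c hc; exact absurd hc (List.not_mem_nil)) (fun c hc => hcs c (List.mem_cons_of_mem _ hc))
        intro l hl
        rcases List.mem_cons.mp hl with h | h
        · subst h; intro c hc; exact hcur c (List.mem_reverse.mp hc)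
        · exact hacc l h
    · rw [if_neg hs] at ht
      refine ih _ _ ht hacc ?_ (fun c hc => hcs c (List.mem_cons_of_mem _ hc))
      intro c' hc'
      rcases List.mem_cons.mp hc' with h | h
      · rw [h]; exact hcs _ List.mem_cons_self
      · exact hcur c' h

theorem mem_split₀_lower_fixed (k t : String)
    (ht : t ∈ PySem.Str.split₀ (PySem.Str.lower k)) : PySem.Str.lower t = t := by
  rw [PySem.Str.split₀] at ht
  rcases List.mem_map.mp ht with ⟨l, hl, rfl⟩
  have hchars : ∀ c ∈ l, PySem.Chars.lowerChar c = c := by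
    rw [PySem.Chars.split₀] at hl
    refine split₀_go_chars _ [] [] l hl (by intro x hx; exact absurd hx (List.not_mem_nil)) (by intro x hx; exact absurd hx (List.not_mem_nil)) ?_
    intro c hc
    rw [show (PySem.Str.lower k).toList = k.toList.map PySem.Chars.lowerChar from by
      simp [PySem.Str.toList_lower, PySem.Chars.lower]] at hc
    rcases List.mem_map.mp hc with ⟨c', _, rfl⟩
    exact lowerChar_idem c'
  rw [PySem.Str.lower]
  have htl : (String.ofList l).toList = l := by simp
  rw [htl]
  rw [show PySem.Chars.lower l = l from List.map_congr_left hchars |>.trans l.map_id]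

-- a string k that lowercasing changes can never be a lowered string
theorem fix_ne (k m : String) (hk : PySem.Str.lower k ≠ k) :
    (k == PySem.Str.lower m) = false := by
  rw [beq_eq_false_iff_ne]
  intro he
  exact hk (by rw [he, lower_idem])

-- ---- A's dict lookup as a first-match scan ----
def scanId (x : String) : List (String × String) → Option String
  | [] => none
  | (k, v) :: rest => if k == x then some v else scanId x rest

theorem get?_mk_eq_scanId (l : List (String × String)) (x : String) :
    (PySem.Dict.mk l).get? x = scanId x l := by
  induction l with
  | nil => rfl
  | cons p rest ih =>
    obtain ⟨k, v⟩ := p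
    rw [PySem.Dict.get?_mk_cons, scanId]
    by_cases h : (k == x) = true <;> simp [h, ih]

-- ---- B's three setdefault loops as first-match scans over the directory rows ----
def scanIdR (x : String) : List (String × String × String) → Option String
  | [] => none
  | (n, u, _) :: rest =>
      if u ≠ "" then (if n == x then some u else scanIdR x rest) else scanIdR x rest

def scanEqR (x : String) : List (String × String × String) → Option String
  | [] => none
  | (n, u, _) :: rest =>
      if u ≠ "" then (if PySem.Str.lower n == x then some u else scanEqR x rest) else scanEqR x rest

def scanTokR (x : String) : List (String × String × String) → Option String
  | [] => none
  | (n, u, _) :: rest =>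
      if u ≠ "" then
        (if x ∈ PySem.Str.split₀ (PySem.Str.lower n) then some u else scanTokR x rest)
      else scanTokR x rest

theorem tier0_snd (rl : List (String × String × String))
    (a b : PySem.Dict String String) :
    (rl.foldl
      (fun acc r =>
        (acc.1.insert r.1 r.2.2, if r.2.1 ≠ "" then acc.2.setdefault r.1 r.2.1 else acc.2))
      (a, b)).2
      = rl.foldl
          (fun d r => if r.2.1 ≠ "" then d.setdefault r.1 r.2.1 else d) b := by
  induction rl generalizing a b with
  | nil => rfl
  | cons r rest ih =>
    obtain ⟨n, u, dd⟩ := r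
    simp only [List.foldl_cons]
    exact ih _ _

theorem get?_foldl_rows_id (x : String) (rl : List (String × String × String))
    (d : PySem.Dict String String) :
    (rl.foldl
        (fun d r => if r.2.1 ≠ "" then d.setdefault r.1 r.2.1 else d) d).get? x
      = ((d.get? x).orElse fun _ => scanIdR x rl) := by
  induction rl generalizing d with
  | nil => cases hd : d.get? x <;> simp [scanIdR, hd]
  | cons r rest ih =>
    obtain ⟨n, u, dd⟩ := r
    simp only [List.foldl_cons, ih]
    by_cases hu : u ≠ ""
    · simp only [if_pos hu]
      by_cases hx : x = n
      · subst hx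
        rw [PySem.Dict.get?_setdefault_self]
        cases hd : d.get? x <;> simp [scanIdR, hu]
      · rw [PySem.Dict.get?_setdefault_of_ne _ _ hx]
        have hb : (n == x) = false := by simp; exact fun h => hx h.symm
        cases hd : d.get? x <;> simp [scanIdR, hu, hb]
    · simp only [if_neg hu]
      cases hd : d.get? x <;> simp [scanIdR, hu]

theorem get?_foldl_rows_lower (x : String) (rl : List (String × String × String))
    (d : PySem.Dict String String) :
    (rl.foldl
        (fun d r => if r.2.1 ≠ "" then d.setdefault (PySem.Str.lower r.1) r.2.1 else d) d).get? x
      = ((d.get? x).orElse fun _ => scanEqR x rl) := by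
  induction rl generalizing d with
  | nil => cases hd : d.get? x <;> simp [scanEqR, hd]
  | cons r rest ih =>
    obtain ⟨n, u, dd⟩ := r
    simp only [List.foldl_cons, ih]
    by_cases hu : u ≠ ""
    · simp only [if_pos hu]
      by_cases hx : x = PySem.Str.lower n
      · subst hx
        rw [PySem.Dict.get?_setdefault_self]
        cases hd : d.get? (PySem.Str.lower n) <;> simp [scanEqR, hu]
      · rw [PySem.Dict.get?_setdefault_of_ne _ _ hx]
        have hb : (PySem.Str.lower n == x) = false := by simp; exact fun h => hx h.symm
        cases hd : d.get? x <;> simp [scanEqR, hu, hb]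
    · simp only [if_neg hu]
      cases hd : d.get? x <;> simp [scanEqR, hu]

theorem get?_foldl_setdefault_const (x uid : String) (ts : List String)
    (d : PySem.Dict String String) :
    (ts.foldl (fun d t => d.setdefault t uid) d).get? x
      = ((d.get? x).orElse fun _ => if x ∈ ts then some uid else none) := by
  induction ts generalizing d with
  | nil => cases hd : d.get? x <;> simp [hd]
  | cons t rest ih =>
    simp only [List.foldl_cons, ih]
    by_cases hx : x = t
    · subst hx
      rw [PySem.Dict.get?_setdefault_self]
      cases hd : d.get? x <;> simp
    · rw [PySem.Dict.get?_setdefault_of_ne _ _ hx]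
      cases hd : d.get? x <;> simp [hx]

theorem get?_foldl_rows_tokens (x : String) (rl : List (String × String × String))
    (d : PySem.Dict String String) :
    (rl.foldl
        (fun d r =>
          if r.2.1 ≠ "" then
            (PySem.Str.split₀ (PySem.Str.lower r.1)).foldl (fun d t => d.setdefault t r.2.1) d
          else d) d).get? x
      = ((d.get? x).orElse fun _ => scanTokR x rl) := by
  induction rl generalizing d with
  | nil => cases hd : d.get? x <;> simp [scanTokR, hd]
  | cons r rest ih =>
    obtain ⟨n, u, dd⟩ := r
    simp only [List.foldl_cons, ih]
    by_cases hu : u ≠ ""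
    · simp only [if_pos hu, get?_foldl_setdefault_const]
      by_cases hmem : x ∈ PySem.Str.split₀ (PySem.Str.lower n) <;>
        cases hd : d.get? x <;> simp [scanTokR, hu, hmem]
    · simp only [if_neg hu]
      cases hd : d.get? x <;> simp [scanTokR, hu]

-- ---- evaluation facts on the literal tables ----
set_option maxHeartbeats 1000000 in set_option maxRecDepth 40000 in
theorem tableID_mk : tableID = PySem.Dict.mk tableID.items := by decide

theorem tableID_get? (x : String) : tableID.get? x = scanId x tableID.items := by
  rw [tableID_mk]
  exact get?_mk_eq_scanId _ x

set_option maxHeartbeats 2000000 in set_option maxRecDepth 40000 in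
theorem hdisp : displayTable = tableName := by decide

set_option maxHeartbeats 2000000 in set_option maxRecDepth 40000 in
theorem key_not_fix : ∀ p ∈ tableID.items, PySem.Str.lower p.1 ≠ p.1 := by decide

set_option maxHeartbeats 1000000 in set_option maxRecDepth 40000 in
theorem hitems : tableID.items = [
  ("Corey Fleming", "U05MSEE6CLE"),
  ("Cameron Pitney", "UJCKXB7TN"),
  ("Claudia Tarrant", "U6WLV9NHH"),
  ("Finn Little", "U04Q8RUES87"),
  ("Anna Heath", "U09H5K1Q0Q7"),
  ("Annaleise Shortland", "UME9TL2HW"),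
  ("Jason Dorday", "U05VDUBTJ9W"),
  ("Michael Craig", "U480M042V"),
  ("Kane Dickie", "U03DA4YAFSN"),
  ("Dean Purcell", "U4B81DLTW"),
  ("Alyse Wright", "U057GUTGG3W"),
  ("Sylvie Whinray", "U0A3XK4466S"),
  ("Tom Augustine", "U954JL83S"),
  ("Mark Mitchell", "U4AJQH95Y"),
  ("Ella Wilks", "U4BV744Q5"),
  ("Hayden Woodward", "U03R4TRKTRR"),
  ("Michael Morrah", "U07B4DXQ95H"),
  ("Sarah Bristow", "U07BTB113U0"),
  ("Mike Scott", "U4PLY5LMV"),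
  ("Simon Plumb", "U47T7L7S4"),
  ("Darryn Fouhy", "U08DYNFE4BT"),
  ("Garth Bray", "U07C7N4EEKS"),
  ("Katie Oliver", "U06Q0JLGKTN")] := by decide

-- the three row scans coincide with A's table scans (Dallas Smith has no id)
theorem bridge_id (x : String) : scanIdR x directoryRows = scanId x tableID.items := by
  rw [hitems]
  simp [scanIdR, scanId, directoryRows]

theorem bridge_eq (x : String) : scanEqR x directoryRows = scanEq x tableID.items := by
  rw [hitems]
  simp [scanEqR, scanEq, directoryRows]

theorem bridge_tok (x : String) : scanTokR x directoryRows = scanTok x tableID.items := by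
  rw [hitems]
  simp [scanTokR, scanTok, directoryRows]

-- B's merged index looked up at x is exactly A's three tiers in order
theorem idx_get? (x : String) : mentionIndex.get? x =
    match tableID.get? x with
    | some u => some u
    | none =>
      match scanEq x tableID.items with
      | some u => some u
      | none => scanTok x tableID.items := by
  have ht0 : tier0.2
      = directoryRows.foldl
          (fun d r => if r.2.1 ≠ "" then d.setdefault r.1 r.2.1 else d) PySem.Dict.empty := by
    unfold tier0
    exact tier0_snd directoryRows PySem.Dict.empty PySem.Dict.empty
  simp only [mentionIndex]
  rw [get?_foldl_rows_tokens, get?_foldl_rows_lower, ht0, get?_foldl_rows_id,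
    PySem.Dict.get?_empty, bridge_id, bridge_eq, bridge_tok, tableID_get?]
  cases scanId x tableID.items <;> cases scanEq x tableID.items <;>
    cases scanTok x tableID.items <;> rfl

-- ---- the case-insensitive tiers vanish at a non-lowercase query ----
theorem scanEq_eq_none (m : String) (hm : PySem.Str.lower m ≠ m)
    (l : List (String × String)) : scanEq m l = none := by
  induction l with
  | nil => rfl
  | cons p rest ih =>
    obtain ⟨k, uid⟩ := p
    rw [scanEq, if_neg, ih]
    intro he
    have he' : PySem.Str.lower k = m := by simpa using he
    exact hm (by rw [← he', lower_idem])

theorem scanTok_eq_none (m : String) (hm : PySem.Str.lower m ≠ m)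
    (l : List (String × String)) : scanTok m l = none := by
  induction l with
  | nil => rfl
  | cons p rest ih =>
    obtain ⟨k, uid⟩ := p
    rw [scanTok, if_neg, ih]
    intro hmem
    exact hm (mem_split₀_lower_fixed k m hmem)

theorem scanId_lower_eq_none (m : String) (l : List (String × String))
    (hl : ∀ p ∈ l, PySem.Str.lower p.1 ≠ p.1) :
    scanId (PySem.Str.lower m) l = none := by
  revert hl
  induction l with
  | nil => exact fun _ => rfl
  | cons p rest ih =>
    intro hl
    obtain ⟨k, v⟩ := p
    rw [scanId, fix_ne k m (hl (k, v) List.mem_cons_self)]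
    simp only [Bool.false_eq_true, if_false]
    exact ih fun q hq => hl q (List.mem_cons_of_mem _ hq)

theorem tableID_get?_lower (m : String) : tableID.get? (PySem.Str.lower m) = none := by
  rw [tableID_get?]
  exact scanId_lower_eq_none m _ key_not_fix

-- A's whole uid computation, as one option-valued function (proof-side)
def aUid (n : String) : Option String :=
  match tableID.get? n with
  | some u => some u
  | none =>
    match scanEq (PySem.Str.lower n) tableID.items with
    | some u => some u
    | none => scanTok (PySem.Str.lower n) tableID.items

-- B's two-lookup scheme computes exactly A's three tiers
theorem lookup_uid_eq (n : String) : lookup_uid n = aUid n := by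
  unfold lookup_uid aUid
  rw [idx_get? n, idx_get? (PySem.Str.lower n)]
  by_cases hm : PySem.Str.lower n = n
  · rw [hm]
    cases tableID.get? n <;> cases scanEq n tableID.items <;>
      cases scanTok n tableID.items <;> rfl
  · rw [tableID_get?_lower, scanEq_eq_none _ hm, scanTok_eq_none _ hm]
    cases tableID.get? n <;> cases scanEq (PySem.Str.lower n) tableID.items <;>
      cases scanTok (PySem.Str.lower n) tableID.items <;> rfl

-- ===== VERDICT (by name: the statement is the Claim_ definition above) =====
theorem slack_mention_spec : Claim_equal_slack_mention := by
  intro name _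
  show slack_mention name = slack_mention_alt name
  unfold slack_mention slack_mention_alt
  rw [lookup_uid_eq, hdisp]
  unfold aUid
  cases h1 : tableID.get? (PySem.Str.strip name) <;>
    cases h2 : scanEq (PySem.Str.lower (PySem.Str.strip name)) tableID.items <;>
      cases h3 : scanTok (PySem.Str.lower (PySem.Str.strip name)) tableID.items <;> rfl
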